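-- pv_equiv track=rewrite | github.com/SangBeom-Hahn/Junior | BOJ/외벽점검(프로그래머스).py | solution
-- ===== SOURCE A (Python) =====
-- from itertools import permutations
--
-- def solution(n, weak, dist):
--     leng = len(weak)
--     for x in range(leng):
--         weak.append(weak[x]+n)
--     answer = len(dist)+1
--
--     for start in range(leng):
--         for fr in list(permutations(dist, len(dist))):
--             count = 1
--             position = weak[start] + fr[0]
--
--             for i in range(start, start+leng):
--                 if(position < weak[i]):
--                     count += 1
--                     if(count > len(dist)):
--                         break
--                     position = weak[i] + fr[count-1]
--             answer = min(answer, count)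
--     return answer
-- ===== SOURCE B (Python) =====
-- from itertools import permutations
--
-- # Incremental search: instead of minimising the greedy count over all full
-- # permutations, try k = 1..len(dist) inspectors and return the first k for which
-- # some ordered k-subset of dist covers all weak points from some start.
-- # Mutates `weak` in place (appends the shifted copy) exactly like A.
-- def solution(n, weak, dist):
--     leng = len(weak)
--     for x in range(leng):
--         weak.append(weak[x] + n)
--
--     def covers(start, fr):
--         count = 1
--         position = weak[start] + fr[0]
--         for i in range(start, start + leng):
--             if position < weak[i]:
--                 if count == len(fr):
--                     return False
--                 position = weak[i] + fr[count]
--                 count += 1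
--         return True
--
--     for k in range(1, len(dist) + 1):
--         for start in range(leng):
--             for fr in permutations(dist, k):
--                 if covers(start, fr):
--                     return k
--     return len(dist) + 1
-- ===== Notes on version B (the rewrite author's own statement) =====
-- stated objective: alternative
-- what changed: Instead of taking the minimum greedy inspector count over all full permutations of dist for every start, B searches incrementally: for k = 1, 2, ..., it tests the ordered k-subsets of dist and returns the first k for which some start is fully covered.
import Mathlib
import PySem

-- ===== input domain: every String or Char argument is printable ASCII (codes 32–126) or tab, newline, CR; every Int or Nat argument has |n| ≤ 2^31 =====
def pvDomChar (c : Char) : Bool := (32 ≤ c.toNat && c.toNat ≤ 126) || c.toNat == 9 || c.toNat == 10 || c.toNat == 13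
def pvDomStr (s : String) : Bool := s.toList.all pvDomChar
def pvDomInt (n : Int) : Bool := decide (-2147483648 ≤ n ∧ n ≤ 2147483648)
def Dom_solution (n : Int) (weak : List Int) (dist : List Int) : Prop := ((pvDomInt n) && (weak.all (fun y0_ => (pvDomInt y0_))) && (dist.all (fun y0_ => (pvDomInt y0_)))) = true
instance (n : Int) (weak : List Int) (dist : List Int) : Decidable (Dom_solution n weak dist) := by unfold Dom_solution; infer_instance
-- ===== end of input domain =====

-- B replaces A's min over all full permutations by an incremental search that returns the
-- first inspector count k for which some ordered k-subset of dist covers from some start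
-- (objective: alternative decomposition). Both Pythons mutate `weak` in place identically
-- (append the n-shifted copy); the theorems are about the return value.

-- ===== PORT A =====
-- shared helper: the in-place wall doubling loop `for x in range(leng): weak.append(weak[x]+n)`
-- (identical source line in A and B); pyGetD's default is never used: x < len(acc).
def pyExtend (n : Int) (weak : List Int) : List Int :=
  (List.range weak.length).foldl (fun acc x => acc ++ [PySem.List.pyGetD acc (x : Int) 0 + n]) weak

-- A's inner greedy loop `for i in range(start, start+leng): …` with its break
-- (break returns the current count). pyGetD defaults are unreachable under Pre_solution.
def aLoop (w fr : List Int) (L : Int) : List Int → Int → Int → Int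
  | [], count, _ => count
  | i :: is, count, position =>
      let wi := PySem.List.pyGetD w i 0
      if position < wi then
        let count' := count + 1
        if count' > L then count'
        else aLoop w fr L is count' (wi + PySem.List.pyGetD fr (count' - 1) 0)
      else aLoop w fr L is count position

def solution (n : Int) (weak : List Int) (dist : List Int) : Int :=
  let leng := weak.length
  let w := pyExtend n weak
  let L : Int := dist.length
  (List.range leng).foldl
    (fun (answer : Int) (start : Nat) =>
      (PySem.List.permutations dist dist.length).foldl
        (fun answer fr =>
          let position := PySem.List.pyGetD w (start : Int) 0 + PySem.List.pyGetD fr 0 0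
          let count := aLoop w fr L
            (PySem.List.pyRange (start : Int) ((start : Int) + (leng : Int)) 1) 1 position
          min answer count)
        answer)
    (L + 1)

-- ===== PORT B =====
-- B's `covers(start, fr)` greedy test: False as soon as the k inspectors run out.
def bLoop (w p : List Int) : List Int → Int → Int → Bool
  | [], _, _ => true
  | i :: is, count, position =>
      let wi := PySem.List.pyGetD w i 0
      if position < wi then
        if count == (p.length : Int) then false
        else bLoop w p is (count + 1) (wi + PySem.List.pyGetD p count 0)
      else bLoop w p is count position

def bCovers (w p : List Int) (start leng : Nat) : Bool :=
  bLoop w p (PySem.List.pyRange (start : Int) ((start : Int) + (leng : Int)) 1) 1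
    (PySem.List.pyGetD w (start : Int) 0 + PySem.List.pyGetD p 0 0)

def solution_alt (n : Int) (weak : List Int) (dist : List Int) : Int :=
  let leng := weak.length
  let w := pyExtend n weak
  ((List.range' 1 dist.length).findSome? (fun k =>
      if (List.range leng).any (fun start =>
            (PySem.List.permutations dist k).any (fun p => bCovers w p start leng))
      then some (k : Int) else none)).getD ((dist.length : Int) + 1)

-- ===== PRECONDITION & SPEC =====
-- Pre_ excludes only nonempty `weak` with empty `dist`, where A raises IndexError on fr[0].
def Pre_solution (n : Int) (weak : List Int) (dist : List Int) : Prop :=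
  weak = [] ∨ dist ≠ []
instance (n : Int) (weak : List Int) (dist : List Int) : Decidable (Pre_solution n weak dist) := by
  unfold Pre_solution; infer_instance
def pvWitness_solution : Int × List Int × List Int := (10, [1, 3], [2])

def Spec_solution (n : Int) (weak : List Int) (dist : List Int) (out : Int) : Prop :=
  out = solution_alt n weak dist
instance (n : Int) (weak : List Int) (dist : List Int) (out : Int) : Decidable (Spec_solution n weak dist out) := by
  unfold Spec_solution; infer_instance

-- ===== CLAIM (what is proved, stated in full; the proofs are below) =====
def Claim_equal_solution : Prop := ∀ (n : Int) (weak : List Int) (dist : List Int), Dom_solution n weak dist → Pre_solution n weak dist → Spec_solution n weak dist (solution n weak dist)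

-- ===== LEMMAS AND PROOFS =====

lemma aLoop_ge (w fr : List Int) (L : Int) :
    ∀ (is : List Int) (c pos : Int), c ≤ aLoop w fr L is c pos := by
  intro is
  induction is with
  | nil => intro c pos; simp [aLoop]
  | cons i is ih =>
    intro c pos
    simp only [aLoop]
    split_ifs with h1 h2
    · omega
    · exact le_trans (by omega) (ih _ _)
    · exact ih _ _

lemma pyGetD_take_eq (fr : List Int) (k : Nat) (c : Int) (h0 : 0 ≤ c) (hc : c < (k : Int))
    (hk : k ≤ fr.length) :
    PySem.List.pyGetD (fr.take k) c 0 = PySem.List.pyGetD fr c 0 := by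
  have hlen : (fr.take k).length = k := by simp; omega
  rw [PySem.List.pyGetD_eq_getElem _ _ h0 (by rw [hlen]; exact_mod_cast hc),
      PySem.List.pyGetD_eq_getElem _ _ h0 (by omega)]
  exact List.getElem_take

lemma loop_bridge (w fr : List Int) (k : Nat) (hkL : k ≤ fr.length) :
    ∀ (is : List Int) (c pos : Int), 1 ≤ c → c ≤ (k : Int) →
      (bLoop w (fr.take k) is c pos = true ↔
        aLoop w fr (fr.length : Int) is c pos ≤ (k : Int)) := by
  intro is
  induction is with
  | nil => intro c pos h1 h2; simp [bLoop, aLoop]; omega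
  | cons i is ih =>
    intro c pos h1 h2
    simp only [bLoop, aLoop]
    have hlen : ((fr.take k).length : Int) = (k : Int) := by simp; omega
    by_cases hpos : pos < PySem.List.pyGetD w i 0
    · simp only [hpos, if_true]
      by_cases hck : c = (k : Int)
      · have hbeq : (c == ((fr.take k).length : Int)) = true := by
          rw [hlen]; exact beq_iff_eq.mpr hck
        rw [hbeq]
        simp only [if_true, Bool.false_eq_true, false_iff, not_le]
        by_cases hbr : c + 1 > (fr.length : Int)
        · simp only [hbr, if_true]; omega
        · simp only [hbr, if_false]
          have := aLoop_ge w fr (fr.length : Int) is (c+1)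
            (PySem.List.pyGetD w i 0 + PySem.List.pyGetD fr (c + 1 - 1) 0)
          omega
      · have hclt : c < (k : Int) := lt_of_le_of_ne h2 hck
        have hbeq : (c == ((fr.take k).length : Int)) = false := by
          rw [hlen]; exact beq_eq_false_iff_ne.mpr hck
        rw [hbeq]
        simp only [Bool.false_eq_true, if_false]
        have hbr : ¬ (c + 1 > (fr.length : Int)) := by omega
        simp only [hbr, if_false]
        rw [pyGetD_take_eq fr k c (by omega) hclt hkL]
        have : c + 1 - 1 = c := by omega
        rw [this]
        exact ih (c+1) _ (by omega) (by omega)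
    · simp only [hpos, if_false]
      exact ih c pos h1 h2

lemma covers_iff (w fr : List Int) (start leng : Nat) (k : Nat) (hk1 : 1 ≤ k)
    (hkL : k ≤ fr.length) :
    (bCovers w (fr.take k) start leng = true ↔
      aLoop w fr (fr.length : Int)
        (PySem.List.pyRange (start : Int) ((start : Int) + (leng : Int)) 1) 1
        (PySem.List.pyGetD w (start : Int) 0 + PySem.List.pyGetD fr 0 0) ≤ (k : Int)) := by
  unfold bCovers
  rw [pyGetD_take_eq fr k 0 le_rfl (by exact_mod_cast hk1) hkL]
  exact loop_bridge w fr k hkL _ 1 _ (by omega) (by exact_mod_cast hk1)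

lemma perms_succ {α : Type} (xs : List α) (r : Nat) :
    PySem.List.permutations xs (r+1) =
      (List.range xs.length).flatMap (fun i =>
        match xs[i]? with
        | none => []
        | some x => (PySem.List.permutations (xs.eraseIdx i) r).map (fun p => x :: p)) := by
  rw [PySem.List.permutations]
  congr 1

lemma perms_length {α : Type} : ∀ (r : Nat) (xs p : List α),
    p ∈ PySem.List.permutations xs r → p.length = r := by
  intro r
  induction r with
  | zero => intro xs p hp; simp [PySem.List.permutations] at hp; simp [hp]
  | succ r ih =>
    intro xs p hp
    rw [perms_succ] at hp
    rcases List.mem_flatMap.mp hp with ⟨i, hi, hmem⟩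
    rcases hx : xs[i]? with _ | x
    · rw [hx] at hmem; simp at hmem
    · rw [hx] at hmem
      rcases List.mem_map.mp hmem with ⟨q, hq, rfl⟩
      simp [ih _ _ hq]

lemma perms_exists_mem {α : Type} : ∀ (r : Nat) (xs : List α), r ≤ xs.length →
    ∃ q, q ∈ PySem.List.permutations xs r := by
  intro r
  induction r with
  | zero => intro xs _; exact ⟨[], by simp [PySem.List.permutations]⟩
  | succ r ih =>
    intro xs hr
    have hx0 : 0 < xs.length := by omega
    have hx : xs[0]? = some xs[0] := List.getElem?_eq_getElem hx0
    have hlen : r ≤ (xs.eraseIdx 0).length := by rw [List.length_eraseIdx_of_lt hx0]; omega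
    rcases ih (xs.eraseIdx 0) hlen with ⟨q, hq⟩
    refine ⟨xs[0] :: q, ?_⟩
    rw [perms_succ]
    refine List.mem_flatMap.mpr ⟨0, List.mem_range.mpr hx0, ?_⟩
    rw [hx]
    exact List.mem_map.mpr ⟨q, hq, rfl⟩

lemma perms_take {α : Type} : ∀ (k r : Nat) (xs fr : List α), k ≤ r → r ≤ xs.length →
    fr ∈ PySem.List.permutations xs r → fr.take k ∈ PySem.List.permutations xs k := by
  intro k
  induction k with
  | zero => intro r xs fr _ _ _; simp [PySem.List.permutations]
  | succ k ih =>
    intro r xs fr hkr hr hfr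
    rcases r with _ | r
    · omega
    rw [perms_succ] at hfr
    rcases List.mem_flatMap.mp hfr with ⟨i, hi, hmem⟩
    rcases hx : xs[i]? with _ | x
    · rw [hx] at hmem; simp at hmem
    · rw [hx] at hmem
      rcases List.mem_map.mp hmem with ⟨q, hq, rfl⟩
      have hilt : i < xs.length := List.mem_range.mp hi
      have hlen : r ≤ (xs.eraseIdx i).length := by rw [List.length_eraseIdx_of_lt hilt]; omega
      have := ih r (xs.eraseIdx i) q (by omega) hlen hq
      rw [perms_succ]
      refine List.mem_flatMap.mpr ⟨i, hi, ?_⟩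
      rw [hx]
      exact List.mem_map.mpr ⟨q.take k, this, by simp⟩

lemma perms_extend {α : Type} : ∀ (k r : Nat) (xs p : List α), k ≤ r → r ≤ xs.length →
    p ∈ PySem.List.permutations xs k →
    ∃ fr ∈ PySem.List.permutations xs r, fr.take k = p := by
  intro k
  induction k with
  | zero =>
    intro r xs p _ hr hp
    simp [PySem.List.permutations] at hp
    rcases perms_exists_mem r xs hr with ⟨q, hq⟩
    exact ⟨q, hq, by simp [hp]⟩
  | succ k ih =>
    intro r xs p hkr hr hp
    rcases r with _ | r
    · omega
    rw [perms_succ] at hp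
    rcases List.mem_flatMap.mp hp with ⟨i, hi, hmem⟩
    rcases hx : xs[i]? with _ | x
    · rw [hx] at hmem; simp at hmem
    · rw [hx] at hmem
      rcases List.mem_map.mp hmem with ⟨q, hq, rfl⟩
      have hilt : i < xs.length := List.mem_range.mp hi
      have hlen : r ≤ (xs.eraseIdx i).length := by rw [List.length_eraseIdx_of_lt hilt]; omega
      rcases ih r (xs.eraseIdx i) q (by omega) hlen hq with ⟨fq, hfq, htake⟩
      refine ⟨x :: fq, ?_, by simp [htake]⟩
      rw [perms_succ]
      refine List.mem_flatMap.mpr ⟨i, hi, ?_⟩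
      rw [hx]
      exact List.mem_map.mpr ⟨fq, hfq, rfl⟩

lemma fmin_le (l : List Int) (init : Int) :
    List.foldl min init l ≤ init ∧ ∀ v ∈ l, List.foldl min init l ≤ v := by
  induction l generalizing init with
  | nil => simp
  | cons x xs ih =>
    simp only [List.foldl_cons]
    rcases ih (min init x) with ⟨h1, h2⟩
    refine ⟨le_trans h1 (min_le_left _ _), ?_⟩
    intro v hv
    rcases List.mem_cons.mp hv with rfl | hv
    · exact le_trans h1 (min_le_right _ _)
    · exact h2 v hv

lemma fmin_cases (l : List Int) (init : Int) :
    List.foldl min init l = init ∨ List.foldl min init l ∈ l := by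
  induction l generalizing init with
  | nil => simp
  | cons x xs ih =>
    simp only [List.foldl_cons]
    rcases ih (min init x) with h | h
    · rcases le_total init x with hle | hle
      · left; rw [h, min_eq_left hle]
      · right; rw [h, min_eq_right hle]; exact List.mem_cons_self
    · right; exact List.mem_cons_of_mem _ h

lemma findSome?_if {α : Type} (Q : Nat → Bool) (g : Nat → α) :
    ∀ (l : List Nat),
      (l.findSome? (fun k => if Q k then some (g k) else none)) = (l.find? Q).map g := by
  intro l
  induction l with
  | nil => simp
  | cons x xs ih =>
    by_cases h : Q x
    · simp [h]
    · simp [h, ih]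

lemma find?_range'_some (Q : Nat → Bool) :
    ∀ (len a m : Nat), a ≤ m → m < a + len → Q m = true →
      (∀ j, a ≤ j → j < m → Q j = false) →
      List.find? Q (List.range' a len) = some m := by
  intro len
  induction len with
  | zero => intro a m h1 h2; omega
  | succ len ih =>
    intro a m h1 h2 hQ hmin
    rw [List.range'_succ, List.find?_cons]
    by_cases ha : a = m
    · subst ha; simp [hQ]
    · have : Q a = false := hmin a le_rfl (by omega)
      rw [this]
      exact ih (a+1) m (by omega) (by omega) hQ (fun j hj1 hj2 => hmin j (by omega) hj2)

theorem solution_eq (n : Int) (weak : List Int) (dist : List Int)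
    (hpre : Pre_solution n weak dist) :
    solution n weak dist = solution_alt n weak dist := by
  set w := pyExtend n weak with hw
  set leng := weak.length with hleng
  set L := dist.length with hL
  set cnt : Nat → List Int → Int := fun start fr =>
    aLoop w fr (L : Int)
      (PySem.List.pyRange (start : Int) ((start : Int) + (leng : Int)) 1) 1
      (PySem.List.pyGetD w (start : Int) 0 + PySem.List.pyGetD fr 0 0) with hcnt
  set vals : List Int := (List.range leng).flatMap
    (fun s => (PySem.List.permutations dist dist.length).map (cnt s)) with hvals
  set Q : Nat → Bool := fun k => (List.range leng).any (fun start =>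
      (PySem.List.permutations dist k).any (fun p => bCovers w p start leng)) with hQ
  have hA : solution n weak dist = List.foldl min ((L : Int) + 1) vals := by
    simp only [solution]
    rw [hvals, List.foldl_flatMap]
    simp only [List.foldl_map]
    rfl
  have hB : solution_alt n weak dist =
      (Option.map (fun k : Nat => (k : Int)) ((List.range' 1 L).find? Q)).getD ((L : Int) + 1) := by
    rw [← findSome?_if Q (fun k : Nat => (k : Int))]
    rfl
  -- Q characterization
  have hQiff : ∀ k : Nat, 1 ≤ k → k ≤ L → (Q k = true ↔ ∃ v ∈ vals, v ≤ (k : Int)) := by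
    intro k hk1 hkL
    rw [hQ]
    simp only [List.any_eq_true]
    constructor
    · rintro ⟨s, hs, p, hp, hcov⟩
      rcases perms_extend k L dist p hkL le_rfl hp with ⟨fr, hfr, htake⟩
      have hfl : fr.length = L := perms_length L dist fr hfr
      have := (covers_iff w fr s leng k hk1 (by omega)).mp (by rw [htake]; exact hcov)
      rw [hfl] at this
      exact ⟨cnt s fr, by
        rw [hvals]
        exact List.mem_flatMap.mpr ⟨s, hs, List.mem_map.mpr ⟨fr, hfr, rfl⟩⟩, this⟩
    · rintro ⟨v, hv, hvk⟩
      rw [hvals] at hv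
      rcases List.mem_flatMap.mp hv with ⟨s, hs, hv2⟩
      rcases List.mem_map.mp hv2 with ⟨fr, hfr, rfl⟩
      have hfl : fr.length = L := perms_length L dist fr hfr
      refine ⟨s, hs, fr.take k, perms_take k L dist fr hkL le_rfl hfr, ?_⟩
      exact (covers_iff w fr s leng k hk1 (by omega)).mpr (by rw [hfl]; exact hvk)
  rw [hA, hB]
  by_cases hleng0 : leng = 0
  · have hvnil : vals = [] := by rw [hvals, hleng0]; simp
    have hfind : (List.range' 1 L).find? Q = none := by
      rw [List.find?_eq_none]
      intro k _
      rw [hQ, hleng0]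
      simp
    rw [hvnil, hfind]
    simp
  · have hdist : dist ≠ [] := by
      rcases hpre with h | h
      · exact absurd (by rw [hleng, h]; rfl) hleng0
      · exact h
    have hL1 : 1 ≤ L := by
      rw [hL]
      exact List.length_pos_iff.mpr hdist
    have hvge : ∀ v ∈ vals, 1 ≤ v := by
      intro v hv
      rw [hvals] at hv
      rcases List.mem_flatMap.mp hv with ⟨s, _, hv2⟩
      rcases List.mem_map.mp hv2 with ⟨fr, _, rfl⟩
      exact aLoop_ge w fr (L : Int) _ 1 _
    set m := List.foldl min ((L : Int) + 1) vals with hm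
    have hm1 : m ≤ (L : Int) + 1 := (fmin_le vals _).1
    have hm2 : ∀ v ∈ vals, m ≤ v := (fmin_le vals _).2
    by_cases hmle : m ≤ (L : Int)
    · have hmem : m ∈ vals := by
        rcases fmin_cases vals ((L : Int) + 1) with h | h
        · rw [← hm] at h; omega
        · rw [← hm] at h; exact h
      have hmge1 : 1 ≤ m := hvge m hmem
      have hk0 : ((m.toNat : Int)) = m := Int.toNat_of_nonneg (by omega)
      have hQm : Q m.toNat = true :=
        (hQiff m.toNat (by omega) (by omega)).mpr ⟨m, hmem, by omega⟩
      have hmin : ∀ j, 1 ≤ j → j < m.toNat → Q j = false := by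
        intro j h1 h2
        by_contra hc
        have hQj : Q j = true := by
          cases hqj : Q j
          · exact absurd hqj hc
          · rfl
        rcases (hQiff j h1 (by omega)).mp hQj with ⟨v, hv, hvj⟩
        have := hm2 v hv
        omega
      rw [find?_range'_some Q L 1 m.toNat (by omega) (by omega) hQm
        (fun j hj1 hj2 => hmin j hj1 hj2)]
      simp [hk0]
    · have hmeq : m = (L : Int) + 1 := by omega
      have hfind : (List.range' 1 L).find? Q = none := by
        rw [List.find?_eq_none]
        intro k hk
        have hkmem := List.mem_range'_1.mp hk
        intro hQk
        rcases (hQiff k (by omega) (by omega)).mp hQk with ⟨v, hv, hvk⟩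
        have := hm2 v hv
        omega
      rw [hfind, hmeq]
      simp

-- ===== VERDICT (by name: the statement is the Claim_ definition above) =====
theorem solution_spec : Claim_equal_solution := by
  intro n weak dist _ hpre
  unfold Spec_solution
  exact solution_eq n weak dist hpre
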